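-- pv_equiv track=rewrite | github.com/Pralad02210217/KattisSolution | Aldursröðun.py | rearrange_children
-- ===== SOURCE A (Python) =====
-- from math import gcd
-- from itertools import permutations
--
-- def rearrange_children(n, ages):
--     for perm in permutations(ages):
--         valid = True
--         for i in range(len(perm) - 1):
--             if gcd(perm[i], perm[i + 1]) == 1:
--                 valid = False
--                 break
--         if valid:
--             return " ".join(map(str, perm))
--     return "Neibb"
-- ===== SOURCE B (Python) =====
-- from math import gcd
--
-- def rearrange_children(n, ages):
--     # Backtracking DFS over index choices (same order as itertools.permutations),
--     # pruning a branch as soon as an adjacent coprime pair appears.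
--     def dfs(prev, remaining):
--         if not remaining:
--             return []
--         for i, x in enumerate(remaining):
--             if prev is None or gcd(prev, x) != 1:
--                 tail = dfs(x, remaining[:i] + remaining[i+1:])
--                 if tail is not None:
--                     return [x] + tail
--         return None
--     r = dfs(None, ages)
--     return " ".join(map(str, r)) if r is not None else "Neibb"
-- ===== Notes on version B (the rewrite author's own statement) =====
-- stated objective: faster
-- what changed: Replaces the generate-every-permutation-then-test loop with a backtracking DFS in the same index order that prunes a branch as soon as an adjacent coprime pair appears, so invalid prefixes are never extended.
import Mathlib
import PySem

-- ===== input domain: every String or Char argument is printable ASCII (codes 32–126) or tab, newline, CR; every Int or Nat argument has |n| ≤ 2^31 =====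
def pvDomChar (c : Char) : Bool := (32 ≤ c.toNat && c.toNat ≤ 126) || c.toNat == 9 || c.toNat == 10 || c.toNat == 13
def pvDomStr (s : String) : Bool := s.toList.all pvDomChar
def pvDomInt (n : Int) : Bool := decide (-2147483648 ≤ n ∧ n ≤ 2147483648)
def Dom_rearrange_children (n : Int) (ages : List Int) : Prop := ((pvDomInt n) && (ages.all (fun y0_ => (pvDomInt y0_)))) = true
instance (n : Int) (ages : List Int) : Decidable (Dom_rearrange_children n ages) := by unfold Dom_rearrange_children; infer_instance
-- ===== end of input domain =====

-- B replaces A's generate-all-permutations-then-test loop with a backtracking DFS in the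
-- same index order, pruning as soon as an adjacent coprime pair appears (objective: faster).

-- ===== PORT A =====
-- selections l = the (element, remaining-elements) pairs in index order (itertools pick order)
def pvSelections (l : List Int) : List (Int × List Int) :=
  match l with
  | [] => []
  | a :: as => (a, as) :: (pvSelections as).map (fun p => (p.1, a :: p.2))

theorem pvSelections_len {l : List Int} {p : Int × List Int}
    (h : p ∈ pvSelections l) : p.2.length + 1 = l.length := by
  induction l generalizing p with
  | nil => simp [pvSelections] at h
  | cons a as ih =>
    simp only [pvSelections, List.mem_cons, List.mem_map] at h
    rcases h with h | ⟨q, hq, rfl⟩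
    · subst h; rfl
    · have := ih hq; simp only [List.length_cons] at this ⊢; omega

-- itertools.permutations(l), in itertools' order
def pvPerms (l : List Int) : List (List Int) :=
  match l with
  | [] => [[]]
  | a :: as =>
    (pvSelections (a :: as)).attach.flatMap
      (fun p => (pvPerms p.1.2).map (p.1.1 :: ·))
termination_by l.length
decreasing_by
  have := pvSelections_len p.2
  omega

-- the inner loop: valid stays True iff no adjacent pair has gcd 1 (break = short-circuit all)
def pvValidA (perm : List Int) : Bool :=
  (List.range (perm.length - 1)).all
    (fun i => !(Int.gcd (perm.getD i 0) (perm.getD (i + 1) 0) == 1))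

def rearrange_children (n : Int) (ages : List Int) : String :=
  match (pvPerms ages).find? pvValidA with
  | some perm => PySem.Str.join " " (perm.map PySem.Int.toStr)
  | none => "Neibb"

-- ===== PORT B =====
-- dfs(prev, remaining) of Source B: first extension (in index order) of the chain ending at prev
def pvDfs (prev : Option Int) (remaining : List Int) : Option (List Int) :=
  match remaining with
  | [] => some []
  | a :: as =>
    (pvSelections (a :: as)).attach.findSome?
      (fun p =>
        if prev.all (fun q => Int.gcd q p.1.1 != 1) then
          (pvDfs (some p.1.1) p.1.2).map (p.1.1 :: ·)
        else none)
termination_by remaining.length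
decreasing_by
  have := pvSelections_len p.2
  omega

def rearrange_children_alt (n : Int) (ages : List Int) : String :=
  match pvDfs none ages with
  | some r => PySem.Str.join " " (r.map PySem.Int.toStr)
  | none => "Neibb"

-- ===== PRECONDITION & SPEC =====
def Spec_rearrange_children (n : Int) (ages : List Int) (out : String) : Prop := out = rearrange_children_alt n ages
instance (n : Int) (ages : List Int) (out : String) : Decidable (Spec_rearrange_children n ages out) := by unfold Spec_rearrange_children; infer_instance

-- ===== CLAIM (what is proved, stated in full; the proofs are below) =====
def Claim_equal_rearrange_children : Prop := ∀ (n : Int) (ages : List Int), Dom_rearrange_children n ages → Spec_rearrange_children n ages (rearrange_children n ages)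

-- ===== LEMMAS AND PROOFS =====

-- chain validity of a permutation with an optional predecessor
def pvGood (prev : Option Int) (p : List Int) : Bool :=
  match p with
  | [] => true
  | x :: xs => (prev.all (fun q => Int.gcd q x != 1)) && pvGood (some x) xs

theorem pvValidA_cons2 (x y : Int) (r : List Int) :
    pvValidA (x :: y :: r) = ((!(Int.gcd x y == 1)) && pvValidA (y :: r)) := by
  simp only [pvValidA, List.length_cons, Nat.add_sub_cancel, List.range_succ_eq_map,
    List.all_cons, List.all_map, Function.comp_def, List.getD_cons_zero, List.getD_cons_succ]

-- adjacent-pair validity, structurally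
def pvChain : List Int → Bool
  | [] => true
  | [_] => true
  | x :: y :: r => (!(Int.gcd x y == 1)) && pvChain (y :: r)

theorem pvValidA_eq_chain (p : List Int) : pvValidA p = pvChain p := by
  induction p with
  | nil => simp [pvValidA, pvChain]
  | cons x xs ih =>
    cases xs with
    | nil => simp [pvValidA, pvChain]
    | cons y r => rw [pvValidA_cons2, ih]; rfl

theorem pvGood_some_eq_chain (p : List Int) (a : Int) :
    pvGood (some a) p = pvChain (a :: p) := by
  induction p generalizing a with
  | nil => simp [pvGood, pvChain]
  | cons x xs ih => rw [pvGood, ih, Option.all_some]; rfl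

theorem pvValidA_eq_good (p : List Int) : pvValidA p = pvGood none p := by
  rw [pvValidA_eq_chain]
  cases p with
  | nil => rfl
  | cons x xs => rw [pvGood, pvGood_some_eq_chain, Option.all_none, Bool.true_and]

theorem find?_flatMap {α β : Type} (xs : List α) (f : α → List β) (q : β → Bool) :
    (xs.flatMap f).find? q = xs.findSome? (fun a => (f a).find? q) := by
  induction xs with
  | nil => simp
  | cons a as ih =>
    rw [List.flatMap_cons, List.find?_append, List.findSome?_cons, ih]
    cases h : (f a).find? q <;> simp

theorem findSome?_attach {α β : Type} (l : List α) (g : α → Option β) :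
    ∀ (f : {x // x ∈ l} → Option β), (∀ (a : α) (h : a ∈ l), f ⟨a, h⟩ = g a) →
    l.attach.findSome? f = l.findSome? g := by
  induction l with
  | nil => intro f _; simp
  | cons a as ih =>
    intro f hfg
    rw [List.attach_cons, List.findSome?_cons, List.findSome?_cons, List.findSome?_map,
        hfg a (by simp)]
    cases h : g a
    · simpa [h] using ih _ (fun x hx => hfg x (by simp [hx]))
    · simp

theorem findSome?_congr {α β : Type} {l : List α} {f g : α → Option β}
    (h : ∀ a ∈ l, f a = g a) : l.findSome? f = l.findSome? g := by
  induction l with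
  | nil => rfl
  | cons a as ih =>
    rw [List.findSome?_cons, List.findSome?_cons, h a (by simp),
        ih (fun x hx => h x (by simp [hx]))]

-- the key invariant: B's DFS returns exactly the first chain-valid permutation in A's order
theorem pvDfs_eq_find (l : List Int) (prev : Option Int) :
    pvDfs prev l = (pvPerms l).find? (pvGood prev) := by
  induction hn : l.length generalizing l prev with
  | zero =>
    have : l = [] := List.length_eq_zero_iff.mp hn
    subst this
    simp [pvDfs, pvPerms, pvGood]
  | succ m ih =>
    cases l with
    | nil => simp at hn
    | cons a as =>
      rw [pvDfs.eq_def, pvPerms.eq_def]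
      simp only []
      rw [find?_flatMap]
      rw [findSome?_attach (pvSelections (a :: as))
            (fun q => if Option.all (fun r => Int.gcd r q.1 != 1) prev = true then
              (pvDfs (some q.1) q.2).map (q.1 :: ·) else none) _ (fun q h => rfl),
          findSome?_attach (pvSelections (a :: as))
            (fun q => ((pvPerms q.2).map (q.1 :: ·)).find? (pvGood prev)) _ (fun q h => rfl)]
      apply findSome?_congr
      intro p hp
      have hlen : p.2.length = m := by
        have := pvSelections_len hp
        simp only [List.length_cons] at this hn
        omega
      rw [List.find?_map]
      have hgood : (pvGood prev ∘ (p.1 :: ·)) =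
          fun xs => (prev.all (fun q => Int.gcd q p.1 != 1)) && pvGood (some p.1) xs := by
        funext xs; simp [pvGood, Function.comp]
      rw [hgood]
      by_cases hchk : prev.all (fun q => Int.gcd q p.1 != 1) = true
      · rw [if_pos hchk, ih p.2 (some p.1) hlen]
        simp only [hchk, Bool.true_and]
      · rw [if_neg hchk]
        have : ∀ xs ∈ pvPerms p.2,
            ((prev.all (fun q => Int.gcd q p.1 != 1)) && pvGood (some p.1) xs) = false := by
          intro xs _
          simp [Bool.eq_false_iff.mpr hchk]
        rw [List.find?_eq_none.mpr (by intro xs hxs; simp [this xs hxs])]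
        simp

-- ===== VERDICT (by name: the statement is the Claim_ definition above) =====
theorem rearrange_children_spec : Claim_equal_rearrange_children := by
  intro n ages _
  unfold Spec_rearrange_children rearrange_children rearrange_children_alt
  rw [pvDfs_eq_find, show pvValidA = pvGood none from funext pvValidA_eq_good]
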